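-- pv_equiv track=rewrite | github.com/xcapaldi/i3-command-palette | i3-command-palette.py | set_mod
-- ===== SOURCE A (Python) =====
-- def set_mod(keybind, mod):
--     """Define how the mod key should be displayed."""
--     # check for the rare keyboard specific keybinding
--     if '+' in keybind:
--         # this could be done simply using the set number of characters but I am trying to make it generic
--         split_keys = keybind.split('+')
--         new_keybind = mod
--         for i in split_keys[1:]:
--             new_keybind += '+'
--             new_keybind += i
--         return new_keybind
--     # otherwise it's a keyboard binding
--     else:
--         return keybind
-- ===== SOURCE B (Python) =====
-- def set_mod(keybind, mod):
--     """Define how the mod key should be displayed."""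
--     if '+' in keybind:
--         # one find-and-slice: keep everything from the first '+' on
--         return mod + keybind[keybind.index('+'):]
--     else:
--         return keybind
-- ===== Notes on version B (the rewrite author's own statement) =====
-- stated objective: simpler
-- what changed: B replaces A's split-on-'+' plus rejoin loop by a single find of the first '+' and one slice, building no intermediate list of parts.
import Mathlib
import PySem

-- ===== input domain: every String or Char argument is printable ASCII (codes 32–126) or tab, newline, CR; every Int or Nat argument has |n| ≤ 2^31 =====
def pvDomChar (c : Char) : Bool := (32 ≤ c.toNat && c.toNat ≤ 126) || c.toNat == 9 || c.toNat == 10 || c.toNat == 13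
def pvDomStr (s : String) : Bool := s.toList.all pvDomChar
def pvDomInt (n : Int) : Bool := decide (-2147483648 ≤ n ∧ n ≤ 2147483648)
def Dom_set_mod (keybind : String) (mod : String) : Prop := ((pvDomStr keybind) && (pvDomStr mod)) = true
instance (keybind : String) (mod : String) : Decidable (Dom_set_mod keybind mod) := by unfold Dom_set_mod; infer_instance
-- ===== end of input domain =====

-- B replaces A's split-on-'+' + rejoin loop by one find of the first '+' and one slice; same return value on all inputs.


-- ===== PORT A =====
def set_mod (keybind : String) (mod : String) : String :=
  if PySem.Str.isIn "+" keybind then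
    let split_keys := PySem.Chars.splitOn keybind.toList ['+']
    let new_keybind :=
      List.foldl (fun nk i => (nk ++ ['+']) ++ i) mod.toList
        (PySem.List.slice split_keys (some 1) none)
    String.ofList new_keybind
  else keybind

-- ===== PORT B =====
-- under the guard '+' is in keybind, where str.index('+') equals PySem.Chars.find (exact there)
def set_mod_alt (keybind : String) (mod : String) : String :=
  if PySem.Str.isIn "+" keybind then
    String.ofList (mod.toList ++
      PySem.Chars.slice keybind.toList (some (PySem.Chars.find keybind.toList ['+'])) none)
  else keybind

-- ===== PRECONDITION & SPEC =====
def Spec_set_mod (keybind : String) (mod : String) (out : String) : Prop := out = set_mod_alt keybind mod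
instance (keybind : String) (mod : String) (out : String) : Decidable (Spec_set_mod keybind mod out) := by unfold Spec_set_mod; infer_instance

-- ===== CLAIM (what is proved, stated in full; the proofs are below) =====
def Claim_equal_set_mod : Prop := ∀ (keybind : String) (mod : String), Dom_set_mod keybind mod → Spec_set_mod keybind mod (set_mod keybind mod)

-- ===== LEMMAS AND PROOFS =====

def np (c : Char) : Bool := c ≠ '+'

def sp (s : List Char) : List (List Char) :=
  match h : s.dropWhile np with
  | [] => [s.takeWhile np]
  | _ :: r => s.takeWhile np :: sp r
termination_by s.length
decreasing_by
  have h1 : (s.dropWhile np).length ≤ s.length := (List.dropWhile_sublist _).length_le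
  rw [h] at h1; simp at h1; omega

theorem sp_nil : sp [] = [[]] := by rw [sp.eq_def]; simp

theorem sp_head (s : List Char) : sp s = s.takeWhile np :: (sp s).tail := by
  rw [sp.eq_def]
  cases h : s.dropWhile np <;> simp

theorem sp_eq_single (s : List Char) (h : s.dropWhile np = []) : sp s = [s.takeWhile np] := by
  rw [sp.eq_def]
  split
  · rfl
  · next x r heq => rw [heq] at h; cases h

theorem sp_eq_cons (s : List Char) (d : Char) (r : List Char) (h : s.dropWhile np = d :: r) :
    sp s = s.takeWhile np :: sp r := by
  rw [sp.eq_def]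
  split
  · next heq => rw [heq] at h; cases h
  · next x r' heq =>
    rw [h] at heq
    injection heq with _ hr
    rw [hr]

theorem take_drop_np (s : List Char) : s.takeWhile np ++ s.dropWhile np = s :=
  List.takeWhile_append_dropWhile

theorem head_dropWhile_plus (s : List Char) (d : Char) (r : List Char)
    (h : s.dropWhile np = d :: r) : d = '+' := by
  have := List.head_dropWhile_not np (l := s) (by simp [h])
  simp only [h, List.head_cons] at this
  simp [np] at this
  exact this

theorem intercalate_cc (sep a b : List Char) (t : List (List Char)) :
    List.intercalate sep (a :: b :: t) = a ++ sep ++ List.intercalate sep (b :: t) := by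
  simp [List.intercalate, List.intersperse]

theorem sp_intercalate (s : List Char) : List.intercalate ['+'] (sp s) = s := by
  induction s using sp.induct with
  | case1 s h =>
    rw [sp_eq_single s h]
    have hs : s.takeWhile np = s := by
      conv_rhs => rw [← take_drop_np s]
      rw [h]; simp
    simp [List.intercalate, hs]
  | case2 s d r h ih =>
    rw [sp_eq_cons s d r h]
    rw [sp_head r, intercalate_cc, ← sp_head r, ih]
    have hd : d = '+' := head_dropWhile_plus s d r h
    conv_rhs => rw [← take_drop_np s]
    rw [h, hd]
    simp

theorem sp_ne_nil (s : List Char) : sp s ≠ [] := by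
  rw [sp_head s]; simp

theorem prefixOf_plus_pos (rest : List Char) : List.isPrefixOf ['+'] ('+' :: rest) = true := by
  simp [List.isPrefixOf]

theorem prefixOf_plus_neg (c : Char) (rest : List Char) (hc : c ≠ '+') :
    List.isPrefixOf ['+'] (c :: rest) = false := by
  simp [List.isPrefixOf]
  exact fun hh => absurd hh.symm hc

theorem splitOn_go_eq (fuel : Nat) : ∀ (s : List Char), s.length < fuel →
    ∀ (cur : List Char) (acc : List (List Char)),
    PySem.Chars.splitOn.go ['+'] fuel s cur acc =
      acc.reverse ++ ((cur.reverse ++ s.takeWhile np) :: (sp s).tail) := by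
  induction fuel with
  | zero => intro s h; omega
  | succ fuel ih =>
    intro s h cur acc
    cases s with
    | nil =>
      rw [PySem.Chars.splitOn.go.eq_def]
      simp [sp_nil]
    | cons c rest =>
      rw [PySem.Chars.splitOn.go.eq_def]
      dsimp only
      have hlen : rest.length < fuel := by simp at h; omega
      by_cases hc : c = '+'
      · subst hc
        rw [if_pos (prefixOf_plus_pos rest)]
        rw [show List.drop (['+'].length) ('+' :: rest) = rest by simp]
        rw [ih rest hlen [] (cur.reverse :: acc)]
        have hsp : sp ('+' :: rest) = [] :: sp rest := by
          have hd : ('+' :: rest).dropWhile np = '+' :: rest := by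
            rw [List.dropWhile_cons_of_neg]; simp [np]
          have := sp_eq_cons ('+' :: rest) '+' rest hd
          rw [this]
          rw [List.takeWhile_cons_of_neg]; simp [np]
        have ht : List.takeWhile np ('+' :: rest) = [] := by
          rw [List.takeWhile_cons_of_neg]; simp [np]
        rw [hsp, ht]
        simp only [List.tail_cons]
        conv_rhs => rw [sp_head rest]
        simp
      · rw [if_neg (by rw [prefixOf_plus_neg c rest hc]; simp)]
        rw [ih rest hlen (c :: cur) acc]
        have htail : (sp (c :: rest)).tail = (sp rest).tail := by
          have hd : (c :: rest).dropWhile np = rest.dropWhile np := by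
            rw [List.dropWhile_cons_of_pos]; simp [np, hc]
          cases hdr : rest.dropWhile np with
          | nil => rw [sp_eq_single _ (hd.trans hdr), sp_eq_single _ hdr]; simp
          | cons d r => rw [sp_eq_cons _ d r (hd.trans hdr), sp_eq_cons _ d r hdr]; simp
        rw [htail]
        have ht : List.takeWhile np (c :: rest) = c :: rest.takeWhile np := by
          rw [List.takeWhile_cons_of_pos]; simp [np, hc]
        rw [ht]
        simp

theorem splitOn_eq_sp (s : List Char) :
    PySem.Chars.splitOn s ['+'] = s.takeWhile np :: (sp s).tail := by
  rw [PySem.Chars.splitOn, splitOn_go_eq (s.length + 1) s (by omega) [] []]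
  simp

theorem find_go_plus (s : List Char) : ∀ (k : Nat),
    PySem.Chars.find.go ['+'] s k =
      if '+' ∈ s then ((k : Int) + (s.takeWhile np).length) else -1 := by
  induction s with
  | nil => intro k; rw [PySem.Chars.find.go.eq_def]; simp
  | cons c rest ih =>
    intro k
    rw [PySem.Chars.find.go.eq_def]
    dsimp only
    by_cases hc : c = '+'
    · subst hc
      rw [if_pos (by rw [prefixOf_plus_pos rest])]
      rw [List.takeWhile_cons_of_neg (by simp [np])]
      simp
    · rw [if_neg (by rw [prefixOf_plus_neg c rest hc]; simp)]
      rw [ih (k + 1)]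
      rw [List.takeWhile_cons_of_pos (by simp [np, hc])]
      by_cases hm : '+' ∈ rest
      · simp [hm, hc]; push_cast; ring
      · simp [hm, hc]
        exact fun hh => absurd hh.symm hc

theorem find_plus (s : List Char) (hm : '+' ∈ s) :
    PySem.Chars.find s ['+'] = ((s.takeWhile np).length : Int) := by
  rw [PySem.Chars.find, find_go_plus s 0]
  simp [hm]

theorem drop_takeWhile (s : List Char) :
    s.drop (s.takeWhile np).length = s.dropWhile np := by
  induction s with
  | nil => rfl
  | cons c t ih =>
    by_cases hc : np c = true
    · rw [List.takeWhile_cons_of_pos hc, List.dropWhile_cons_of_pos hc]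
      simpa using ih
    · have hc' : np c ≠ true := hc
      rw [List.takeWhile_cons_of_neg hc', List.dropWhile_cons_of_neg hc']
      simp

theorem foldl_glue (l : List (List Char)) : ∀ (m : List Char),
    List.foldl (fun nk i => (nk ++ ['+']) ++ i) m l = m ++ l.flatMap (fun p => '+' :: p) := by
  induction l with
  | nil => intro m; simp
  | cons p rest ih =>
    intro m
    rw [List.foldl_cons, ih, List.flatMap_cons]
    simp [List.append_assoc]

theorem flatMap_glue_intercalate (l : List (List Char)) (hne : l ≠ []) :
    l.flatMap (fun p => '+' :: p) = '+' :: List.intercalate ['+'] l := by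
  induction l with
  | nil => exact absurd rfl hne
  | cons p t ih =>
    cases t with
    | nil => simp [List.intercalate]
    | cons q t' =>
      rw [List.flatMap_cons, ih (by simp), intercalate_cc]
      simp

theorem tail_glue (s : List Char) (hm : '+' ∈ s) :
    (sp s).tail.flatMap (fun p => '+' :: p) = s.drop (s.takeWhile np).length := by
  rw [drop_takeWhile]
  have hne : s.dropWhile np ≠ [] := by
    simp only [ne_eq, List.dropWhile_eq_nil_iff]
    push_neg
    exact ⟨'+', hm, by simp [np]⟩
  obtain ⟨d, r, hdr⟩ := List.exists_cons_of_ne_nil hne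
  have hd : d = '+' := head_dropWhile_plus s d r hdr
  have htail : (sp s).tail = sp r := by rw [sp_eq_cons s d r hdr]; simp
  rw [htail, hdr, hd]
  rw [flatMap_glue_intercalate (sp r) (sp_ne_nil r), sp_intercalate r]

theorem mem_of_isIn (s : String) (h : PySem.Str.isIn "+" s = true) : '+' ∈ s.toList := by
  have := (PySem.Str.isIn_iff_infix "+" s).mp h
  have hsub := this.sublist
  exact (List.singleton_sublist).mp (by simpa using hsub)

-- ===== VERDICT (by name: the statement is the Claim_ definition above) =====
theorem set_mod_spec : Claim_equal_set_mod := by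
  intro keybind mod _
  unfold Spec_set_mod set_mod set_mod_alt
  by_cases h : PySem.Str.isIn "+" keybind = true
  · rw [if_pos h, if_pos h]
    have hm : '+' ∈ keybind.toList := mem_of_isIn keybind h
    congr 1
    dsimp only
    rw [splitOn_eq_sp, PySem.List.slice_from_one]
    simp only [List.tail_cons]
    rw [foldl_glue, tail_glue keybind.toList hm]
    rw [PySem.Chars.slice_eq_listSlice, find_plus keybind.toList hm,
      PySem.List.slice_from_natCast]
  · rw [if_neg h, if_neg h]
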